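-- pv_equiv track=rewrite | github.com/lujuny/TibetanUrineAI | apps/api/app/services/image_quality.py | _recommendations_for_issues
-- ===== SOURCE A (Python) =====
-- def _recommendations_for_issues(issues: list[dict[str, str]]) -> list[str]:
--     if not issues:
--         return ["图像质量可用，可进入后续视觉特征分析。"]
--
--     recommendations: list[str] = []
--     issue_types = {item["type"] for item in issues}
--
--     if "missing_image" in issue_types or "file_not_found" in issue_types:
--         recommendations.append("请重新上传尿液样本图像。")
--     if "invalid_image" in issue_types:
--         recommendations.append("请上传可正常打开的 JPG、PNG 或 WEBP 图像。")
--     if "low_resolution" in issue_types: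
--         recommendations.append("请使用更高分辨率图像，尽量保证样本区域清晰完整。")
--     if "underexposed" in issue_types:
--         recommendations.append("请增加环境光或靠近稳定光源重新拍摄。")
--     if "overexposed" in issue_types or "highlight_reflection" in issue_types:
--         recommendations.append("请避开强反光和直射光，调整角度后重新拍摄。")
--     if "low_contrast" in issue_types:
--         recommendations.append("请使用白色或浅色背景，并让尿液样本与背景边界更清楚。")
--     if "blurred" in issue_types:
--         recommendations.append("请保持设备稳定，重新拍摄清晰图像。")
--
--     return recommendations or ["建议重新采集一张更清晰、光照更稳定的图像。"]
-- ===== SOURCE B (Python) =====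
-- _DEFAULT_OK = "图像质量可用，可进入后续视觉特征分析。"
-- _DEFAULT_RETRY = "建议重新采集一张更清晰、光照更稳定的图像。"
--
-- # Inverted index: issue type -> slot (priority) of the recommendation it triggers.
-- _SLOT_BY_TYPE = {
--     "missing_image": 0,
--     "file_not_found": 0,
--     "invalid_image": 1,
--     "low_resolution": 2,
--     "underexposed": 3,
--     "overexposed": 4,
--     "highlight_reflection": 4,
--     "low_contrast": 5,
--     "blurred": 6,
-- }
--
-- _MESSAGES = [
--     "请重新上传尿液样本图像。",
--     "请上传可正常打开的 JPG、PNG 或 WEBP 图像。",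
--     "请使用更高分辨率图像，尽量保证样本区域清晰完整。",
--     "请增加环境光或靠近稳定光源重新拍摄。",
--     "请避开强反光和直射光，调整角度后重新拍摄。",
--     "请使用白色或浅色背景，并让尿液样本与背景边界更清楚。",
--     "请保持设备稳定，重新拍摄清晰图像。",
-- ]
--
--
-- def _recommendations_for_issues(issues: list[dict[str, str]]) -> list[str]:
--     if not issues:
--         return [_DEFAULT_OK]
--     # One pass over the issues, mapping each type straight to its message slot;
--     # unknown types hit no slot.  Emitting the slots in sorted order reproduces
--     # the fixed priority of the recommendations.
--     slots: set[int] = set()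
--     for item in issues:
--         slot = _SLOT_BY_TYPE.get(item["type"])
--         if slot is not None:
--             slots.add(slot)
--     return [_MESSAGES[i] for i in sorted(slots)] or [_DEFAULT_RETRY]
-- ===== Notes on version B (the rewrite author's own statement) =====
-- stated objective: alternative
-- what changed: Inverts the control flow: instead of building the set of issue types and probing it with seven hard-coded membership tests, B maps each issue's type through an inverted index (type -> message slot) in a single pass, collects the set of triggered slot numbers, and emits the messages of the sorted slots.
import Mathlib
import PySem

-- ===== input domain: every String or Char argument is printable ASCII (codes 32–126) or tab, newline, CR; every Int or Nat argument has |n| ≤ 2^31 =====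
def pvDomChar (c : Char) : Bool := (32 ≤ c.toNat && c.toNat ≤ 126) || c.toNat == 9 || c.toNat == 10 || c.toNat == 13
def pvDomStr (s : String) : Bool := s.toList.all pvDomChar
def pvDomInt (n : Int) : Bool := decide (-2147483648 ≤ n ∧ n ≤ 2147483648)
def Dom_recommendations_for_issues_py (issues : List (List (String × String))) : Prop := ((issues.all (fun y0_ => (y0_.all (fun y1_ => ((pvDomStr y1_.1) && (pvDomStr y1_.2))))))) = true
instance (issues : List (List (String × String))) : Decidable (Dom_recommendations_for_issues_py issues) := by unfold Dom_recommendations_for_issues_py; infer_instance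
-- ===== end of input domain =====

-- B inverts A's control flow: instead of probing the set of issue types with seven
-- hard-coded membership tests, it maps each issue's type through an inverted index
-- (type -> message slot), collects the triggered slot numbers and emits the messages
-- of the sorted slots (alternative decomposition, same cost).

-- ===== PORT A =====
-- item["type"] (total form; Pre_ guarantees the key is present)
def pvTypeOf (item : List (String × String)) : String := (PySem.Dict.mk item).getD "type" ""

-- issue_types = {item["type"] for item in issues}
def pvIssueTypes (issues : List (List (String × String))) : PySem.Set String :=
  PySem.Set.ofList (issues.map pvTypeOf)

-- one 'if <cond>: recommendations.append(<msg>)' statement of A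
def pvAppendIf (r : List String) (b : Bool) (s : String) : List String :=
  if b then r ++ [s] else r

-- A: early return for empty list, set comprehension of types, then seven explicit ifs
-- appending to an accumulator, then the 'or' fallback.
def recommendations_for_issues_py (issues : List (List (String × String))) : List String :=
  if issues = [] then ["图像质量可用，可进入后续视觉特征分析。"]
  else
    let issue_types : PySem.Set String := pvIssueTypes issues
    let recommendations : List String := []
    let recommendations := pvAppendIf recommendations (PySem.Set.contains issue_types "missing_image" || PySem.Set.contains issue_types "file_not_found") "请重新上传尿液样本图像。"
    let recommendations := pvAppendIf recommendations (PySem.Set.contains issue_types "invalid_image") "请上传可正常打开的 JPG、PNG 或 WEBP 图像。"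
    let recommendations := pvAppendIf recommendations (PySem.Set.contains issue_types "low_resolution") "请使用更高分辨率图像，尽量保证样本区域清晰完整。"
    let recommendations := pvAppendIf recommendations (PySem.Set.contains issue_types "underexposed") "请增加环境光或靠近稳定光源重新拍摄。"
    let recommendations := pvAppendIf recommendations (PySem.Set.contains issue_types "overexposed" || PySem.Set.contains issue_types "highlight_reflection") "请避开强反光和直射光，调整角度后重新拍摄。"
    let recommendations := pvAppendIf recommendations (PySem.Set.contains issue_types "low_contrast") "请使用白色或浅色背景，并让尿液样本与背景边界更清楚。"
    let recommendations := pvAppendIf recommendations (PySem.Set.contains issue_types "blurred") "请保持设备稳定，重新拍摄清晰图像。"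
    if recommendations = [] then ["建议重新采集一张更清晰、光照更稳定的图像。"] else recommendations

-- ===== PORT B =====
-- _SLOT_BY_TYPE: inverted index issue type -> message slot
def pvSlotTable : PySem.Dict String Int :=
  PySem.Dict.mk
    [ ("missing_image", 0), ("file_not_found", 0), ("invalid_image", 1),
      ("low_resolution", 2), ("underexposed", 3), ("overexposed", 4),
      ("highlight_reflection", 4), ("low_contrast", 5), ("blurred", 6) ]

-- _MESSAGES
def pvMessages : List String :=
  [ "请重新上传尿液样本图像。",
    "请上传可正常打开的 JPG、PNG 或 WEBP 图像。",
    "请使用更高分辨率图像，尽量保证样本区域清晰完整。",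
    "请增加环境光或靠近稳定光源重新拍摄。",
    "请避开强反光和直射光，调整角度后重新拍摄。",
    "请使用白色或浅色背景，并让尿液样本与背景边界更清楚。",
    "请保持设备稳定，重新拍摄清晰图像。" ]

-- the 'for item in issues: slot = _SLOT_BY_TYPE.get(item["type"]); if slot is not None: slots.add(slot)' loop body
def pvAddSlot (s : PySem.Set Int) (item : List (String × String)) : PySem.Set Int :=
  match pvSlotTable.get? (pvTypeOf item) with
  | some i => PySem.Set.add s i
  | none => s

-- B: early return for empty list, one pass collecting the set of triggered slots,
-- then '[_MESSAGES[i] for i in sorted(slots)] or [default]'.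
def recommendations_for_issues_py_alt (issues : List (List (String × String))) : List String :=
  if issues = [] then ["图像质量可用，可进入后续视觉特征分析。"]
  else
    let slots : PySem.Set Int := issues.foldl pvAddSlot PySem.Set.empty
    let recs : List String :=
      (PySem.List.sorted slots (fun x => x)).map (fun i => PySem.List.pyGetD pvMessages i "")
    if recs = [] then ["建议重新采集一张更清晰、光照更稳定的图像。"] else recs

-- ===== PRECONDITION & SPEC =====
-- Pre_ excludes inputs where some issue dict lacks a "type" key: there the Python A
-- (and B alike) raises KeyError and returns no value.
def Pre_recommendations_for_issues_py (issues : List (List (String × String))) : Prop :=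
  issues.all (fun item => (PySem.Dict.mk item).contains "type") = true
instance (issues : List (List (String × String))) : Decidable (Pre_recommendations_for_issues_py issues) := by unfold Pre_recommendations_for_issues_py; infer_instance
def pvWitness_recommendations_for_issues_py : (List (List (String × String))) :=
  [[("type", "blurred")], [("type", "overexposed"), ("score", "3")]]
def Spec_recommendations_for_issues_py (issues : List (List (String × String))) (out : List String) : Prop := out = recommendations_for_issues_py_alt issues
instance (issues : List (List (String × String))) (out : List String) : Decidable (Spec_recommendations_for_issues_py issues out) := by unfold Spec_recommendations_for_issues_py; infer_instance

-- ===== CLAIM (what is proved, stated in full; the proofs are below) =====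
def Claim_equal_recommendations_for_issues_py : Prop := ∀ (issues : List (List (String × String))), Dom_recommendations_for_issues_py issues → Pre_recommendations_for_issues_py issues → Spec_recommendations_for_issues_py issues (recommendations_for_issues_py issues)

-- ===== LEMMAS AND PROOFS =====

-- the per-type Boolean both sides reduce to
def pvHasType (issues : List (List (String × String))) (t : String) : Bool :=
  issues.any (fun item => pvTypeOf item == t)

theorem pvAppendIf_eq (r : List String) (b : Bool) (s : String) :
    pvAppendIf r b s = r ++ (if b then [s] else []) := by
  unfold pvAppendIf; cases b <;> simp

theorem pv_any_or {α : Type} (l : List α) (p q : α → Bool) :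
    (l.any fun x => p x || q x) = (l.any p || l.any q) := by
  induction l with
  | nil => rfl
  | cons a l ih =>
    simp only [List.any_cons, ih]
    cases p a <;> cases q a <;> simp

-- A's membership tests, in terms of pvHasType
theorem pvContains_issueTypes (issues : List (List (String × String))) (t : String) :
    PySem.Set.contains (pvIssueTypes issues) t = pvHasType issues t := by
  rw [Bool.eq_iff_iff]
  simp only [pvIssueTypes, PySem.Set.contains, List.contains_iff_mem,
    PySem.Set.mem_ofList, pvHasType, List.any_eq_true, List.mem_map, beq_iff_eq]

-- Set.contains of Set.add, Boolean form
theorem pvContains_add (s : PySem.Set Int) (x y : Int) :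
    PySem.Set.contains (PySem.Set.add s x) y = (PySem.Set.contains s y || y == x) := by
  rw [Bool.eq_iff_iff]
  simp [PySem.Set.contains, PySem.Set.mem_add]

-- membership in the slot fold
theorem pvContains_fold (issues : List (List (String × String))) (s0 : PySem.Set Int) (i : Int) :
    PySem.Set.contains (issues.foldl pvAddSlot s0) i
      = (PySem.Set.contains s0 i || issues.any (fun item => pvSlotTable.get? (pvTypeOf item) == some i)) := by
  induction issues generalizing s0 with
  | nil => simp
  | cons x xs ih =>
    simp only [List.foldl_cons, List.any_cons, ih]
    unfold pvAddSlot
    cases h : pvSlotTable.get? (pvTypeOf x) with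
    | none => simp
    | some j =>
      simp only [pvContains_add]
      cases hji : (i == j) <;> cases hc : PySem.Set.contains s0 i <;>
        simp_all [BEq.comm]

-- nodup of the slot fold
theorem pvNodup_add (s : PySem.Set Int) (x : Int) (h : s.Nodup) :
    (PySem.Set.add s x).Nodup := by
  unfold PySem.Set.add
  split
  · exact h
  · rename_i hc
    simp only [PySem.Set.contains, List.contains_iff_mem] at hc
    simp only [List.nodup_append, List.nodup_cons, List.not_mem_nil, not_false_iff,
      List.nodup_nil, and_true, true_and]
    refine ⟨h, fun a ha b hb heq => hc ?_⟩
    simp only [List.mem_singleton] at hb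
    subst hb; subst heq
    exact ha

theorem pvNodup_fold (issues : List (List (String × String))) (s0 : PySem.Set Int)
    (h : s0.Nodup) : (issues.foldl pvAddSlot s0).Nodup := by
  induction issues generalizing s0 with
  | nil => exact h
  | cons x xs ih =>
    simp only [List.foldl_cons]
    apply ih
    unfold pvAddSlot
    cases pvSlotTable.get? (pvTypeOf x) with
    | none => exact h
    | some j => exact pvNodup_add _ _ h

-- every slot ever added lies in 0..6
theorem pvSlot_mem_range (t : String) (v : Int) (h : pvSlotTable.get? t = some v) :
    v ∈ ([0, 1, 2, 3, 4, 5, 6] : List Int) := by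
  simp only [pvSlotTable, PySem.Dict.get?] at h
  rcases Option.map_eq_some_iff.mp h with ⟨p, hp, hv⟩
  have := List.mem_of_find?_eq_some hp
  subst hv
  fin_cases this <;> simp

theorem pvMem_fold_range (issues : List (List (String × String))) (s0 : PySem.Set Int)
    (hs0 : ∀ y ∈ s0, y ∈ ([0, 1, 2, 3, 4, 5, 6] : List Int)) (x : Int)
    (h : x ∈ issues.foldl pvAddSlot s0) : x ∈ ([0, 1, 2, 3, 4, 5, 6] : List Int) := by
  induction issues generalizing s0 with
  | nil => exact hs0 x h
  | cons a l ih =>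
    refine ih (pvAddSlot s0 a) ?_ h
    intro y hy
    unfold pvAddSlot at hy
    cases hg : pvSlotTable.get? (pvTypeOf a) with
    | none => rw [hg] at hy; exact hs0 y hy
    | some j =>
      rw [hg] at hy
      rcases (PySem.Set.mem_add s0 j y).mp hy with hy' | rfl
      · exact hs0 y hy'
      · exact pvSlot_mem_range _ _ hg

-- sorted(slots) is the 0..6 scan filtered by membership
theorem pvSorted_fold (issues : List (List (String × String))) :
    PySem.List.sorted (issues.foldl pvAddSlot PySem.Set.empty) (fun x => x)
      = ([0, 1, 2, 3, 4, 5, 6] : List Int).filter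
          (fun j => PySem.Set.contains (issues.foldl pvAddSlot PySem.Set.empty) j) := by
  apply PySem.List.sorted_eq_of_perm_of_pairwise_lt
  · apply (List.perm_ext_iff_of_nodup (List.Nodup.filter _ (by decide))
      (pvNodup_fold issues PySem.Set.empty List.nodup_nil)).mpr
    intro x
    simp only [List.mem_filter, PySem.Set.contains, List.contains_iff_mem]
    exact ⟨fun h => h.2, fun h => ⟨pvMem_fold_range issues PySem.Set.empty (by simp [PySem.Set.empty]) x h, h⟩⟩
  · exact List.Pairwise.filter _ (by decide)

-- the inverted index, written out
theorem pvGet?_slotTable (t : String) :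
    pvSlotTable.get? t =
      if t = "missing_image" then some 0
      else if t = "file_not_found" then some 0
      else if t = "invalid_image" then some 1
      else if t = "low_resolution" then some 2
      else if t = "underexposed" then some 3
      else if t = "overexposed" then some 4
      else if t = "highlight_reflection" then some 4
      else if t = "low_contrast" then some 5
      else if t = "blurred" then some 6
      else none := by
  simp only [pvSlotTable, PySem.Dict.get?, List.find?]
  split_ifs <;> simp_all [beq_eq_decide, eq_comm]

-- per-slot characterisation of the inverted index
theorem pvChar0 (t : String) : (pvSlotTable.get? t == some 0) = (t == "missing_image" || t == "file_not_found") := by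
  rw [pvGet?_slotTable]; split_ifs <;> simp_all [beq_eq_decide]
theorem pvChar1 (t : String) : (pvSlotTable.get? t == some 1) = (t == "invalid_image") := by
  rw [pvGet?_slotTable]; split_ifs <;> simp_all [beq_eq_decide]
theorem pvChar2 (t : String) : (pvSlotTable.get? t == some 2) = (t == "low_resolution") := by
  rw [pvGet?_slotTable]; split_ifs <;> simp_all [beq_eq_decide]
theorem pvChar3 (t : String) : (pvSlotTable.get? t == some 3) = (t == "underexposed") := by
  rw [pvGet?_slotTable]; split_ifs <;> simp_all [beq_eq_decide]
theorem pvChar4 (t : String) : (pvSlotTable.get? t == some 4) = (t == "overexposed" || t == "highlight_reflection") := by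
  rw [pvGet?_slotTable]; split_ifs <;> simp_all [beq_eq_decide]
theorem pvChar5 (t : String) : (pvSlotTable.get? t == some 5) = (t == "low_contrast") := by
  rw [pvGet?_slotTable]; split_ifs <;> simp_all [beq_eq_decide]
theorem pvChar6 (t : String) : (pvSlotTable.get? t == some 6) = (t == "blurred") := by
  rw [pvGet?_slotTable]; split_ifs <;> simp_all [beq_eq_decide]


theorem pvFilterMap_cons {α β : Type} (p : α → Bool) (f : α → β) (a : α) (l : List α) :
    (List.filter p (a :: l)).map f = (if p a then [f a] else []) ++ (List.filter p l).map f := by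
  by_cases h : p a <;> simp [h]

-- ===== VERDICT (by name: the statement is the Claim_ definition above) =====
theorem recommendations_for_issues_py_spec : Claim_equal_recommendations_for_issues_py := by
  intro issues _ _
  unfold Spec_recommendations_for_issues_py recommendations_for_issues_py recommendations_for_issues_py_alt
  cases issues with
  | nil => rfl
  | cons x xs =>
    simp only [if_neg (List.cons_ne_nil x xs)]
    rw [pvSorted_fold]
    simp only [pvContains_fold, pvContains_issueTypes, pvChar0, pvChar1, pvChar2, pvChar3,
      pvChar4, pvChar5, pvChar6, pv_any_or, pvFilterMap_cons, List.filter_nil,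
      List.map_nil, List.append_nil, List.nil_append, pvAppendIf_eq, List.append_assoc,
      pvHasType]
    simp [pvMessages, PySem.List.pyGetD, PySem.List.pyIdx?, PySem.List.pyGet?]
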